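-- pv_equiv track=rewrite | github.com/Vergil0327/leetcode-history | Stack/Monotone Stack/2334. Subarray With Elements Greater Than Varying Threshold/solution.py | validSubarraySize
-- ===== SOURCE A (Python) =====
-- from typing import List
--
-- def validSubarraySize(nums: List[int], threshold: int) -> int:
--     n = len(nums)
--
--     nextSmaller = [n]*n
--     stack = []
--     for i, num in enumerate(nums):
--         while stack and nums[stack[-1]] > num:
--             nextSmaller[stack.pop()] = i
--         stack.append(i)
--
--     prevSmaller = [-1]*n
--     stack = []
--     for i, num in enumerate(nums):
--         while stack and nums[stack[-1]] > num:
--             stack.pop()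
--
--         if stack:
--             prevSmaller[i] = stack[-1]
--         stack.append(i)
--
--     for i in range(n):
--         if nums[i] * (size := nextSmaller[i]-prevSmaller[i]-1) > threshold:
--             return size
--     return -1
-- ===== SOURCE B (Python) =====
-- def validSubarraySize(nums, threshold):
--     n = len(nums)
--     for i, v in enumerate(nums):
--         left = i
--         while left - 1 >= 0 and nums[left - 1] > v:
--             left -= 1
--         right = i
--         while right + 1 < n and nums[right + 1] >= v:
--             right += 1
--         size = right - left + 1
--         if v * size > threshold:
--             return size
--     return -1
-- ===== Notes on version B (the rewrite author's own statement) =====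
-- stated objective: simpler
-- what changed: Replaced the two monotonic-stack passes and the precomputed nextSmaller/prevSmaller index tables by a single loop that, for each index, expands a left pointer over strictly-greater neighbours and a right pointer over greater-or-equal neighbours and tests the span directly.
import Mathlib
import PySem

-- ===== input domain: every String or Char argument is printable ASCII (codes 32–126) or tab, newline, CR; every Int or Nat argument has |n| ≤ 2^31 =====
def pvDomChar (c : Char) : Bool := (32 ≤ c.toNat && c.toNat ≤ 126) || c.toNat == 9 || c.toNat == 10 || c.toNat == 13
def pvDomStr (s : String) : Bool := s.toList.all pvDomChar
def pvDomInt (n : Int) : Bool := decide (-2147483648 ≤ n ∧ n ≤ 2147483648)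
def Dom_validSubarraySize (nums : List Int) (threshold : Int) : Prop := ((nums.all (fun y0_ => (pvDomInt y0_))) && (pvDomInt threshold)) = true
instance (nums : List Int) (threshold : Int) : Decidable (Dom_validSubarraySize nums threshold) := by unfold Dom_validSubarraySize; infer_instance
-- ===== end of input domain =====

-- B replaces A's two monotonic-stack passes and nextSmaller/prevSmaller index tables by a single
-- loop that expands a left/right pointer pair around each index (simpler decomposition; not faster).

-- ===== PORT A =====
-- stack indices are always < nums.length, so nums.getD j 0 is exactly Python's nums[j]
-- inner while of A's first loop: pop while nums[stack[-1]] > num, recording nextSmaller[popped] = i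
def popNs (nums : List Int) (num : Int) (i : Nat) : List Nat → List Int → List Nat × List Int
  | [], ns => ([], ns)
  | j :: st, ns =>
      if nums.getD j 0 > num then popNs nums num i st (ns.set j (i : Int)) else (j :: st, ns)

-- A's first loop over enumerate(nums); head of the stack list = Python stack[-1]
def nsLoop (nums : List Int) : List Int → Nat → List Nat → List Int → List Int
  | [], _, _, ns => ns
  | num :: rest, i, st, ns =>
      let p := popNs nums num i st ns
      nsLoop nums rest (i + 1) (i :: p.1) p.2

-- inner while of A's second loop: pop while nums[stack[-1]] > num
def popPs (nums : List Int) (num : Int) : List Nat → List Nat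
  | [] => []
  | j :: st => if nums.getD j 0 > num then popPs nums num st else j :: st

-- A's second loop: if the stack is nonempty after popping, prevSmaller[i] = stack[-1]
def psLoop (nums : List Int) : List Int → Nat → List Nat → List Int → List Int
  | [], _, _, ps => ps
  | num :: rest, i, st, ps =>
      let st' := popPs nums num st
      let ps' := match st' with
        | [] => ps
        | j :: _ => ps.set i (j : Int)
      psLoop nums rest (i + 1) (i :: st') ps'

-- A's final loop: for i in range(n), return size at the first hit, else -1
def scanA (nums ns ps : List Int) (threshold : Int) : List Nat → Int
  | [] => -1
  | i :: rest =>
      let size := ns.getD i 0 - ps.getD i 0 - 1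
      if nums.getD i 0 * size > threshold then size else scanA nums ns ps threshold rest

def validSubarraySize (nums : List Int) (threshold : Int) : Int :=
  let n := nums.length
  let nextSmaller := nsLoop nums nums 0 [] (List.replicate n (n : Int))
  let prevSmaller := psLoop nums nums 0 [] (List.replicate n (-1))
  scanA nums nextSmaller prevSmaller threshold (List.range n)

-- ===== PORT B =====
-- while left - 1 >= 0 and nums[left - 1] > v: left -= 1
def goLeft (nums : List Int) (v : Int) : Nat → Nat
  | 0 => 0
  | l + 1 => if nums.getD l 0 > v then goLeft nums v l else l + 1

-- while right + 1 < n and nums[right + 1] >= v: right += 1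
def goRight (nums : List Int) (v : Int) (n : Nat) (r : Nat) : Nat :=
  if r + 1 < n then
    (if nums.getD (r + 1) 0 ≥ v then goRight nums v n (r + 1) else r)
  else r
  termination_by n - r

-- B's single loop over enumerate(nums) with early return
def bLoop (nums : List Int) (threshold : Int) (n : Nat) : Nat → List Int → Int
  | _, [] => -1
  | i, v :: rest =>
      let l := goLeft nums v i
      let r := goRight nums v n i
      let size : Int := (r : Int) - (l : Int) + 1
      if v * size > threshold then size else bLoop nums threshold n (i + 1) rest

def validSubarraySize_alt (nums : List Int) (threshold : Int) : Int :=
  bLoop nums threshold nums.length 0 nums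

-- ===== PRECONDITION & SPEC =====
def Spec_validSubarraySize (nums : List Int) (threshold : Int) (out : Int) : Prop := out = validSubarraySize_alt nums threshold
instance (nums : List Int) (threshold : Int) (out : Int) : Decidable (Spec_validSubarraySize nums threshold out) := by unfold Spec_validSubarraySize; infer_instance

-- ===== CLAIM (what is proved, stated in full; the proofs are below) =====
def Claim_equal_validSubarraySize : Prop := ∀ (nums : List Int) (threshold : Int), Dom_validSubarraySize nums threshold → Spec_validSubarraySize nums threshold (validSubarraySize nums threshold)

-- ===== LEMMAS AND PROOFS =====

-- the stack after A has processed the first i elements (both of A's loops evolve it identically)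
def stk (nums : List Int) : Nat → List Nat
  | 0 => []
  | i + 1 => i :: popPs nums (nums.getD i 0) (stk nums i)

-- least index k with i < k < nums.length looked at by step i and nums[k] < nums[j]; the value
-- nextSmaller[j] holds after A's first loop has processed the first i elements
def nsE (nums : List Int) (i j : Nat) : Int :=
  match (List.range' (j + 1) (i - (j + 1))).find? (fun k => decide (nums.getD k 0 < nums.getD j 0)) with
  | some k => (k : Int)
  | none => (nums.length : Int)

theorem popPs_sublist (nums : List Int) (v : Int) (st : List Nat) :
    (popPs nums v st).Sublist st := by
  induction st with
  | nil => simp [popPs]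
  | cons j rest ih =>
      simp only [popPs]
      split
      · exact ih.trans (List.sublist_cons_self _ _)
      · exact List.Sublist.refl _

theorem getD_set_ne' (l : List Int) (x : Int) {j t : Nat} (h : j ≠ t) :
    (l.set j x).getD t 0 = l.getD t 0 := by
  rw [List.getD_eq_getElem?_getD, List.getElem?_set_ne h, ← List.getD_eq_getElem?_getD]

theorem getD_set_self' (l : List Int) (x : Int) {j : Nat} (h : j < l.length) :
    (l.set j x).getD j 0 = x := by
  rw [List.getD_eq_getElem?_getD, List.getElem?_set_self h, Option.getD_some]

theorem stk_lt (nums : List Int) (i : Nat) : ∀ j ∈ stk nums i, j < i := by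
  induction i with
  | zero => simp [stk]
  | succ i ih =>
      intro j hj
      simp only [stk, List.mem_cons] at hj
      rcases hj with rfl | hj
      · omega
      · exact Nat.lt_succ_of_lt (ih j ((popPs_sublist nums _ _).mem hj))

theorem stk_sorted (nums : List Int) (i : Nat) : (stk nums i).Pairwise (· > ·) := by
  induction i with
  | zero => simp [stk]
  | succ i ih =>
      simp only [stk]
      refine List.Pairwise.cons ?_ (List.Pairwise.sublist (popPs_sublist nums _ _) ih)
      intro j hj
      exact stk_lt nums i j ((popPs_sublist nums _ _).mem hj)

theorem popPs_mem (nums : List Int) (v : Int) (st : List Nat)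
    (hmono : st.Pairwise (fun a b => nums.getD b 0 ≤ nums.getD a 0)) (j : Nat) :
    j ∈ popPs nums v st ↔ j ∈ st ∧ nums.getD j 0 ≤ v := by
  induction st with
  | nil => simp [popPs]
  | cons t rest ih =>
      rcases List.pairwise_cons.mp hmono with ⟨ht, hrest⟩
      simp only [popPs]
      split
      · rename_i hgt
        rw [ih hrest]
        simp only [List.mem_cons]
        constructor
        · rintro ⟨hm, hle⟩; exact ⟨Or.inr hm, hle⟩
        · rintro ⟨hm | hm, hle⟩
          · subst hm; omega
          · exact ⟨hm, hle⟩
      · rename_i hle0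
        have hle := not_lt.mp hle0
        simp only [List.mem_cons]
        constructor
        · rintro (rfl | hm)
          · exact ⟨Or.inl rfl, hle⟩
          · exact ⟨Or.inr hm, le_trans (ht j hm) hle⟩
        · rintro ⟨hm, _⟩; exact hm

theorem stk_mem (nums : List Int) (i : Nat) (j : Nat) :
    j ∈ stk nums i ↔ j < i ∧ ∀ k, j < k → k < i → nums.getD j 0 ≤ nums.getD k 0 := by
  induction i generalizing j with
  | zero => simp [stk]
  | succ i ih =>
      have hval : (stk nums i).Pairwise (fun a b => nums.getD b 0 ≤ nums.getD a 0) := by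
        refine (stk_sorted nums i).imp_of_mem ?_
        intro a b ha hb hab
        exact ((ih b).mp hb).2 a hab (stk_lt nums i a ha)
      simp only [stk, List.mem_cons, popPs_mem nums _ _ hval, ih j]
      constructor
      · rintro (rfl | ⟨⟨hj, hall⟩, hle⟩)
        · exact ⟨Nat.lt_succ_self _, fun k hk1 hk2 => absurd (lt_of_le_of_lt (Nat.succ_le_of_lt hk1) hk2) (lt_irrefl _)⟩
        · refine ⟨Nat.lt_succ_of_lt hj, fun k hk1 hk2 => ?_⟩
          rcases Nat.lt_succ_iff_lt_or_eq.mp hk2 with h | rfl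
          · exact hall k hk1 h
          · exact hle
      · rintro ⟨hj, hall⟩
        rcases Nat.lt_succ_iff_lt_or_eq.mp hj with h | rfl
        · exact Or.inr ⟨⟨h, fun k hk1 hk2 => hall k hk1 (Nat.lt_succ_of_lt hk2)⟩,
            hall i h (Nat.lt_succ_self _)⟩
        · exact Or.inl rfl

theorem stk_valPairwise (nums : List Int) (i : Nat) :
    (stk nums i).Pairwise (fun a b => nums.getD b 0 ≤ nums.getD a 0) := by
  refine (stk_sorted nums i).imp_of_mem ?_
  intro a b ha hb hab
  exact ((stk_mem nums i b).mp hb).2 a hab (stk_lt nums i a ha)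

theorem goLeft_spec (nums : List Int) (v : Int) (i : Nat) :
    goLeft nums v i ≤ i ∧
    (∀ k, goLeft nums v i ≤ k → k < i → v < nums.getD k 0) ∧
    (goLeft nums v i = 0 ∨ nums.getD (goLeft nums v i - 1) 0 ≤ v) := by
  induction i with
  | zero => exact ⟨le_refl _, fun k h1 h2 => absurd (lt_of_le_of_lt h1 h2) (lt_irrefl _), Or.inl rfl⟩
  | succ i ih =>
      simp only [goLeft]
      split
      · rename_i hgt
        obtain ⟨h1, h2, h3⟩ := ih
        refine ⟨Nat.le_succ_of_le h1, fun k hk1 hk2 => ?_, h3⟩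
        rcases Nat.lt_succ_iff_lt_or_eq.mp hk2 with h | rfl
        · exact h2 k hk1 h
        · exact hgt
      · rename_i hle
        exact ⟨le_refl _, fun k h1 h2 => absurd (lt_of_le_of_lt h1 h2) (lt_irrefl _),
          Or.inr (by simpa using not_lt.mp hle)⟩

-- head of a strictly descending list that contains m while everything is ≤ m
theorem head?_eq_of_max {l : List Nat} (hs : l.Pairwise (· > ·)) {m : Nat}
    (hm : m ∈ l) (hb : ∀ j ∈ l, j ≤ m) : l.head? = some m := by
  cases l with
  | nil => simp at hm
  | cons h t =>
      rcases List.mem_cons.mp hm with rfl | hmt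
      · rfl
      · have h1 := (List.pairwise_cons.mp hs).1 m hmt
        have h2 := hb h List.mem_cons_self
        omega

theorem popPs_head (nums : List Int) (i : Nat) :
    (popPs nums (nums.getD i 0) (stk nums i)).head? =
      if goLeft nums (nums.getD i 0) i = 0 then none
      else some (goLeft nums (nums.getD i 0) i - 1) := by
  set v := nums.getD i 0 with hv
  have hval := stk_valPairwise nums i
  obtain ⟨hl1, hl2, hl3⟩ := goLeft_spec nums v i
  split
  · rename_i h0
    rw [List.head?_eq_none_iff, List.eq_nil_iff_forall_not_mem]
    intro j hj
    rw [popPs_mem nums v _ hval] at hj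
    have hji := stk_lt nums i j hj.1
    exact absurd hj.2 (not_le.mpr (hl2 j (h0 ▸ Nat.zero_le j) hji))
  · rename_i h0
    obtain ⟨m, hm⟩ : ∃ m, goLeft nums v i = m + 1 := ⟨goLeft nums v i - 1, by omega⟩
    rw [hm]
    simp only [Nat.add_sub_cancel]
    refine head?_eq_of_max (List.Pairwise.sublist (popPs_sublist nums v _) (stk_sorted nums i)) ?_ ?_
    · rw [popPs_mem nums v _ hval, stk_mem]
      have hmi : m < i := by omega
      have hmv : nums.getD m 0 ≤ v := by
        rcases hl3 with h | h
        · omega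
        · rwa [hm, Nat.add_sub_cancel] at h
      exact ⟨⟨hmi, fun k hk1 hk2 => le_trans hmv (le_of_lt (hl2 k (by omega) hk2))⟩, hmv⟩
    · intro j hj
      rw [popPs_mem nums v _ hval] at hj
      have hji := stk_lt nums i j hj.1
      by_contra hgt
      exact absurd hj.2 (not_le.mpr (hl2 j (by omega) hji))

-- the value prevSmaller[i] ends up holding
def psVal (nums : List Int) (i : Nat) : Int :=
  match (popPs nums (nums.getD i 0) (stk nums i)).head? with
  | none => -1
  | some j => (j : Int)

theorem psVal_eq_goLeft (nums : List Int) (i : Nat) :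
    psVal nums i = (goLeft nums (nums.getD i 0) i : Int) - 1 := by
  unfold psVal
  rw [popPs_head]
  by_cases h0 : goLeft nums (nums.getD i 0) i = 0
  · rw [if_pos h0, h0]
    norm_num
  · rw [if_neg h0]
    show ((goLeft nums (nums.getD i 0) i - 1 : Nat) : Int) = _
    have h1 : 1 ≤ goLeft nums (nums.getD i 0) i := Nat.one_le_iff_ne_zero.mpr h0
    omega

theorem psLoop_preserve (nums : List Int) : ∀ (rest : List Int) (i : Nat) (st : List Nat)
    (ps : List Int) (t : Nat), t < i → (psLoop nums rest i st ps).getD t 0 = ps.getD t 0 := by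
  intro rest
  induction rest with
  | nil => intro i st ps t ht; simp [psLoop]
  | cons num rest ih =>
      intro i st ps t ht
      simp only [psLoop]
      rw [ih _ _ _ t (Nat.lt_succ_of_lt ht)]
      cases popPs nums num st with
      | nil => rfl
      | cons j _ =>
          exact getD_set_ne' ps _ (by omega)

theorem psLoop_getD (nums : List Int) : ∀ (m i : Nat) (ps : List Int),
    m = nums.length - i → ps.length = nums.length →
    (∀ t, i ≤ t → t < nums.length → ps.getD t 0 = -1) →
    ∀ t, i ≤ t → t < nums.length →
      (psLoop nums (nums.drop i) i (stk nums i) ps).getD t 0 = psVal nums t := by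
  intro m
  induction m with
  | zero => intro i ps hm hlen hinit t ht1 ht2; omega
  | succ m ih =>
      intro i ps hm hlen hinit t ht1 ht2
      have hi : i < nums.length := by omega
      have hdrop : nums.drop i = nums.getD i 0 :: nums.drop (i + 1) := by
        rw [List.getD_eq_getElem _ _ hi, ← List.getElem_cons_drop]
      rw [hdrop]
      simp only [psLoop]
      have hstk : (i :: popPs nums (nums.getD i 0) (stk nums i)) = stk nums (i + 1) := rfl
      set st' := popPs nums (nums.getD i 0) (stk nums i) with hst'
      set ps' := (match st' with | [] => ps | j :: _ => ps.set i (j : Int)) with hps'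
      have hlen' : ps'.length = nums.length := by
        rw [hps']; cases st' <;> simp [hlen]
      have hinit' : ∀ u, i + 1 ≤ u → u < nums.length → ps'.getD u 0 = -1 := by
        intro u hu1 hu2
        rw [hps']
        cases st' with
        | nil => exact hinit u (by omega) hu2
        | cons j _ =>
            rw [getD_set_ne' ps _ (by omega)]
            exact hinit u (by omega) hu2
      have hpsi : ps'.getD i 0 = psVal nums i := by
        rw [hps']
        unfold psVal
        rw [← hst']
        cases st' with
        | nil => simpa using hinit i (le_refl i) hi
        | cons j rest =>
            simp only [List.head?_cons]
            rw [getD_set_self' ps _ (by omega)]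
      rcases Nat.lt_or_ge t (i + 1) with h | h
      · have hti : t = i := by omega
        subst hti
        rw [hstk, psLoop_preserve nums _ _ _ _ t (Nat.lt_succ_self t)]
        exact hpsi
      · rw [hstk]
        exact ih (i + 1) ps' (by omega) hlen' hinit' t h ht2

-- popNs leaves the same stack as popPs
theorem popNs_fst (nums : List Int) (v : Int) (i : Nat) : ∀ (st : List Nat) (ns : List Int),
    (popNs nums v i st ns).1 = popPs nums v st := by
  intro st
  induction st with
  | nil => intro ns; simp [popNs, popPs]
  | cons j rest ih =>
      intro ns
      simp only [popNs, popPs]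
      split
      · exact ih _
      · rfl

theorem popNs_len (nums : List Int) (v : Int) (i : Nat) : ∀ (st : List Nat) (ns : List Int),
    (popNs nums v i st ns).2.length = ns.length := by
  intro st
  induction st with
  | nil => intro ns; simp [popNs]
  | cons j rest ih =>
      intro ns
      simp only [popNs]
      split
      · rw [ih]; simp
      · rfl

theorem popNs_snd (nums : List Int) (v : Int) (i : Nat) : ∀ (st : List Nat) (ns : List Int),
    st.Pairwise (· > ·) →
    st.Pairwise (fun a b => nums.getD b 0 ≤ nums.getD a 0) →
    (∀ j ∈ st, j < ns.length) →
    ∀ t, (popNs nums v i st ns).2.getD t 0 =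
      if t ∈ st ∧ v < nums.getD t 0 then (i : Int) else ns.getD t 0 := by
  intro st
  induction st with
  | nil => intro ns _ _ _ t; simp [popNs]
  | cons j rest ih =>
      intro ns hsort hval hlen t
      rcases List.pairwise_cons.mp hsort with ⟨hjgt, hsort'⟩
      rcases List.pairwise_cons.mp hval with ⟨hjval, hval'⟩
      simp only [popNs]
      split
      · rename_i hgt
        rw [ih _ hsort' hval' (by intro a ha; rw [List.length_set]; exact hlen a (List.mem_cons_of_mem _ ha)) t]
        by_cases htj : t = j
        · subst htj
          have htrest : t ∉ rest := fun hm => absurd (hjgt t hm) (lt_irrefl t)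
          rw [if_neg (fun hc => htrest hc.1), if_pos ⟨List.mem_cons_self, by omega⟩]
          rw [getD_set_self' ns _ (hlen t List.mem_cons_self)]
        · rw [getD_set_ne' ns _ (Ne.symm htj)]
          by_cases hmem : t ∈ rest ∧ v < nums.getD t 0
          · rw [if_pos hmem, if_pos ⟨List.mem_cons_of_mem _ hmem.1, hmem.2⟩]
          · rw [if_neg hmem, if_neg (by
              rintro ⟨hm, hlt⟩
              rcases List.mem_cons.mp hm with rfl | hm
              · exact htj rfl
              · exact hmem ⟨hm, hlt⟩)]
      · rename_i hle0
        have hle := not_lt.mp hle0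
        rw [if_neg]
        rintro ⟨hm, hlt⟩
        rcases List.mem_cons.mp hm with rfl | hm
        · omega
        · have := hjval t hm
          omega

theorem nsE_ge (nums : List Int) (i j : Nat) (h : i ≤ j + 1) : nsE nums i j = (nums.length : Int) := by
  unfold nsE
  rw [Nat.sub_eq_zero_of_le h]
  simp

theorem nsE_step (nums : List Int) (i : Nat) (t : Nat) :
    nsE nums (i + 1) t =
      if t ∈ stk nums i ∧ nums.getD i 0 < nums.getD t 0 then (i : Int) else nsE nums i t := by
  rcases Nat.lt_or_ge t i with hti | hti
  · have hsplit : List.range' (t + 1) (i + 1 - (t + 1)) =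
        List.range' (t + 1) (i - (t + 1)) ++ [i] := by
      have h1 : i + 1 - (t + 1) = (i - (t + 1)) + 1 := by omega
      rw [h1, List.range'_1_concat]
      congr 1
      simp
      omega
    by_cases hmem : t ∈ stk nums i
    · have hall := ((stk_mem nums i t).mp hmem).2
      have hnone : (List.range' (t + 1) (i - (t + 1))).find?
          (fun k => decide (nums.getD k 0 < nums.getD t 0)) = none := by
        rw [List.find?_eq_none]
        intro k hk
        rw [List.mem_range'_1] at hk
        simp only [decide_eq_true_eq]
        exact not_lt.mpr (hall k (by omega) (by omega))
      by_cases hlt : nums.getD i 0 < nums.getD t 0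
      · rw [if_pos ⟨hmem, hlt⟩]
        unfold nsE
        rw [hsplit, List.find?_append, hnone, Option.none_or]
        rw [List.find?_singleton, if_pos (decide_eq_true hlt)]
      · rw [if_neg (fun hc => hlt hc.2)]
        unfold nsE
        rw [hsplit, List.find?_append, hnone, Option.none_or]
        rw [List.find?_singleton, if_neg (by simp only [decide_eq_false hlt]; exact Bool.false_ne_true)]
    · rw [if_neg (fun hc => hmem hc.1)]
      have hex : ∃ k ∈ List.range' (t + 1) (i - (t + 1)),
          (fun k => decide (nums.getD k 0 < nums.getD t 0)) k = true := by
        rw [stk_mem, not_and, not_forall] at hmem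
        obtain ⟨k, hk⟩ := hmem hti
        rw [not_forall] at hk
        obtain ⟨hk1, hk⟩ := hk
        rw [not_forall] at hk
        obtain ⟨hk2, hk3'⟩ := hk
        have hk3 := not_le.mp hk3'
        refine ⟨k, List.mem_range'_1.mpr ⟨by omega, by omega⟩, ?_⟩
        simp only [decide_eq_true_eq]
        omega
      have hsome := List.find?_isSome.mpr hex
      unfold nsE
      rw [hsplit, List.find?_append]
      cases hfind : (List.range' (t + 1) (i - (t + 1))).find?
          (fun k => decide (nums.getD k 0 < nums.getD t 0)) with
      | none => rw [hfind] at hsome; simp at hsome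
      | some k => simp
  · have h1 : t ∉ stk nums i := fun hm => absurd (stk_lt nums i t hm) (by omega)
    rw [if_neg (fun hc => h1 hc.1), nsE_ge nums (i + 1) t (by omega), nsE_ge nums i t (by omega)]

theorem nsLoop_getD (nums : List Int) : ∀ (m i : Nat) (ns : List Int),
    m = nums.length - i → i ≤ nums.length → ns.length = nums.length →
    (∀ t, t < nums.length → ns.getD t 0 = nsE nums i t) →
    ∀ t, t < nums.length →
      (nsLoop nums (nums.drop i) i (stk nums i) ns).getD t 0 = nsE nums nums.length t := by
  intro m
  induction m with
  | zero =>
      intro i ns hm hile hlen hinit t ht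
      have : i = nums.length := by omega
      subst this
      rw [List.drop_length]
      simp only [nsLoop]
      exact hinit t ht
  | succ m ih =>
      intro i ns hm hile hlen hinit t ht
      have hi : i < nums.length := by omega
      have hdrop : nums.drop i = nums.getD i 0 :: nums.drop (i + 1) := by
        rw [List.getD_eq_getElem _ _ hi, ← List.getElem_cons_drop]
      rw [hdrop]
      simp only [nsLoop]
      have hfst : (popNs nums (nums.getD i 0) i (stk nums i) ns).1 = popPs nums (nums.getD i 0) (stk nums i) :=
        popNs_fst nums _ i _ ns
      have hstk : (i :: popPs nums (nums.getD i 0) (stk nums i)) = stk nums (i + 1) := rfl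
      rw [hfst, hstk]
      refine ih (i + 1) _ (by omega) (by omega) (by rw [popNs_len, hlen]) ?_ t ht
      intro u hu
      rw [popNs_snd nums _ i _ ns (stk_sorted nums i) (stk_valPairwise nums i)
        (fun a ha => by rw [hlen]; exact lt_trans (stk_lt nums i a ha) hi) u]
      rw [nsE_step]
      split
      · rfl
      · exact hinit u hu

theorem goRight_spec (nums : List Int) (v : Int) (n : Nat) : ∀ (m r : Nat), m = n - r →
    r ≤ goRight nums v n r ∧
    (r < n → goRight nums v n r < n) ∧
    (∀ k, r < k → k ≤ goRight nums v n r → v ≤ nums.getD k 0) ∧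
    (n ≤ goRight nums v n r + 1 ∨ nums.getD (goRight nums v n r + 1) 0 < v) := by
  intro m
  induction m with
  | zero =>
      intro r hm
      have hr : n ≤ r + 1 := by omega
      rw [goRight, if_neg (by omega)]
      exact ⟨le_refl _, by omega, fun k h1 h2 => by omega, Or.inl hr⟩
  | succ m ih =>
      intro r hm
      rw [goRight]
      split
      · rename_i hrn
        split
        · rename_i hge
          obtain ⟨h1, h2, h3, h4⟩ := ih (r + 1) (by omega)
          refine ⟨by omega, fun _ => h2 hrn, fun k hk1 hk2 => ?_, h4⟩
          rcases Nat.eq_or_lt_of_le (Nat.succ_le_of_lt hk1) with h | h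
          · rw [← h]; exact hge
          · exact h3 k (by omega) hk2
        · rename_i hlt
          exact ⟨le_refl _, fun _ => by omega, fun k h1 h2 => by omega, Or.inr (not_le.mp hlt)⟩
      · rename_i hrn
        exact ⟨le_refl _, by omega, fun k h1 h2 => by omega, Or.inl (by omega)⟩

theorem nsE_eq_goRight (nums : List Int) (i : Nat) (hi : i < nums.length) :
    nsE nums nums.length i = (goRight nums (nums.getD i 0) nums.length i : Int) + 1 := by
  set v := nums.getD i 0 with hv
  obtain ⟨h1, h2, h3, h4⟩ := goRight_spec nums v nums.length (nums.length - i) i rfl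
  set r := goRight nums v nums.length i with hr
  have hrn : r < nums.length := h2 hi
  have hsum : nums.length - (i + 1) = (r - i) + (nums.length - (r + 1)) := by omega
  have haux : i + 1 + 1 * (r - i) = r + 1 := by omega
  have hsplit : List.range' (i + 1) (nums.length - (i + 1)) =
      List.range' (i + 1) (r - i) ++ List.range' (r + 1) (nums.length - (r + 1)) := by
    rw [hsum, ← List.range'_append, haux]
  have hnone : (List.range' (i + 1) (r - i)).find?
      (fun k => decide (nums.getD k 0 < v)) = none := by
    rw [List.find?_eq_none]
    intro k hk
    rw [List.mem_range'_1] at hk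
    simp only [decide_eq_true_eq]
    exact not_lt.mpr (h3 k (by omega) (by omega))
  unfold nsE
  rw [← hv, hsplit, List.find?_append, hnone, Option.none_or]
  rcases Nat.lt_or_ge (r + 1) nums.length with hlt | hge
  · have h' : nums.getD (r + 1) 0 < v := by
      rcases h4 with h | h
      · omega
      · exact h
    have hm : nums.length - (r + 1) = (nums.length - (r + 2)) + 1 := by omega
    rw [hm, List.range'_succ]
    have hd : decide (nums.getD (r + 1) 0 < v) = true := decide_eq_true h'
    rw [List.find?_cons, hd]
    push_cast
    ring
  · have hm : nums.length - (r + 1) = 0 := by omega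
    rw [hm]
    simp only [List.range'_zero, List.find?_nil]
    have hre : r + 1 = nums.length := by omega
    rw [← hre]
    push_cast
    ring

theorem scan_eq (nums : List Int) (threshold : Int) (nsF psF : List Int)
    (hns : ∀ t, t < nums.length → nsF.getD t 0 = nsE nums nums.length t)
    (hps : ∀ t, t < nums.length → psF.getD t 0 = psVal nums t) :
    ∀ (m i : Nat), m = nums.length - i →
      scanA nums nsF psF threshold (List.range' i (nums.length - i)) =
        bLoop nums threshold nums.length i (nums.drop i) := by
  intro m
  induction m with
  | zero =>
      intro i hm
      have h0 : nums.length - i = 0 := by omega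
      rw [h0, List.range'_zero, List.drop_eq_nil_of_le (by omega)]
      simp [scanA, bLoop]
  | succ m ih =>
      intro i hm
      have hi : i < nums.length := by omega
      have h1 : nums.length - i = (nums.length - (i + 1)) + 1 := by omega
      have hdrop : nums.drop i = nums.getD i 0 :: nums.drop (i + 1) := by
        rw [List.getD_eq_getElem _ _ hi, ← List.getElem_cons_drop]
      rw [h1, List.range'_succ, hdrop]
      have hsize : nsF.getD i 0 - psF.getD i 0 - 1 =
          ((goRight nums (nums.getD i 0) nums.length i : Nat) : Int) -
            ((goLeft nums (nums.getD i 0) i : Nat) : Int) + 1 := by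
        rw [hns i hi, hps i hi, psVal_eq_goLeft, nsE_eq_goRight nums i hi]
        ring
      simp only [scanA, bLoop, hsize]
      rw [ih (i + 1) (by omega)]

theorem validSubarraySize_spec : Claim_equal_validSubarraySize := by
  intro nums threshold _
  unfold Spec_validSubarraySize validSubarraySize validSubarraySize_alt
  have hns : ∀ t, t < nums.length →
      (nsLoop nums (nums.drop 0) 0 (stk nums 0)
        (List.replicate nums.length (nums.length : Int))).getD t 0 = nsE nums nums.length t :=
    nsLoop_getD nums nums.length 0 _ (by omega) (by omega) (by simp)
      (fun t ht => by rw [List.getD_replicate _ ht, nsE_ge nums 0 t (by omega)])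
  have hps : ∀ t, 0 ≤ t → t < nums.length →
      (psLoop nums (nums.drop 0) 0 (stk nums 0) (List.replicate nums.length (-1))).getD t 0 =
        psVal nums t :=
    psLoop_getD nums nums.length 0 _ (by omega) (by simp)
      (fun t _ ht => List.getD_replicate _ ht)
  have h := scan_eq nums threshold _ _ hns (fun t ht => hps t (Nat.zero_le t) ht)
    nums.length 0 (by omega)
  show scanA nums (nsLoop nums nums 0 [] (List.replicate nums.length (nums.length : Int)))
      (psLoop nums nums 0 [] (List.replicate nums.length (-1))) threshold
      (List.range nums.length) = bLoop nums threshold nums.length 0 nums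
  rw [List.range_eq_range']
  exact h
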